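-- pv_equiv track=rewrite | github.com/ezrealenoch/python | Homework 2/Homework2Program2StringShuffleEnochWang.py | ShuffleString
-- ===== SOURCE A (Python) =====
-- def ShuffleString(s, indices):
--     l = list(s)
--     string = ""
--     x = 0
--     for j in range(0,len(indices)):
--         for i in range(0,len(indices)):
--             if x == indices[i]:
--                 string = string + string.join(l[i])
--                 x = x + 1
--                 break
--     return string
-- ===== SOURCE B (Python) =====
-- def ShuffleString(s, indices):
--     # First-occurrence index of each value, built in one pass.
--     first = {}
--     for i, v in enumerate(indices):
--         if v not in first:
--             first[v] = i
--     out = []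
--     x = 0
--     while x in first:
--         out.append(s[first[x]])
--         x += 1
--     return ''.join(out)
-- ===== Notes on version B (the rewrite author's own statement) =====
-- stated objective: faster
-- what changed: A rescans the whole index list for every output position (nested loops, O(n^2)); B builds a first-occurrence hash map of the indices in one pass and then walks the chain x=0,1,2,... with O(1) lookups, O(n) total.
import Mathlib
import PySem

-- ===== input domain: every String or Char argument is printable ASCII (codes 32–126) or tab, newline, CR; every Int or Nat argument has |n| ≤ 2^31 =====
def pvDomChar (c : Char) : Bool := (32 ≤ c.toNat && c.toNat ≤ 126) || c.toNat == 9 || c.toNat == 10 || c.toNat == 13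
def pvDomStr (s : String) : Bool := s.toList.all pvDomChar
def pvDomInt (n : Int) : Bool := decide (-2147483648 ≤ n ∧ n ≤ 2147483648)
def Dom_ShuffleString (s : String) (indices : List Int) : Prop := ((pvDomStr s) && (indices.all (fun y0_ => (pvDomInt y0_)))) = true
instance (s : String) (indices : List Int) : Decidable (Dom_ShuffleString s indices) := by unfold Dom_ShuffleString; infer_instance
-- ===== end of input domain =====

-- B replaces A's O(n^2) rescan-per-character with a one-pass first-occurrence map and an O(n) chain walk (return value only).


-- ===== PORT A =====
-- One round of A's outer loop: the inner loop 'for i in range(len(indices)): if x == indices[i]: …; break'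
-- is the scan for the FIRST i with indices[i] == x (= PySem.List.index?); on a hit A appends
-- string.join(l[i]) — joining a 1-char string yields exactly that character — and increments x.
-- The accumulated Python str is carried as its List Char (PySem strings are List Char); pyGet? none = IndexError (outside Pre_).
def pvStepA (l : List Char) (indices : List Int) (st : List Char × Int) : List Char × Int :=
  match PySem.List.index? indices st.2 with
  | some i =>
    match PySem.List.pyGet? l ((i : Nat) : Int) with
    | some c => (st.1 ++ [c], st.2 + 1)
    | none => st
  | none => st

def ShuffleString (s : String) (indices : List Int) : String :=
  let l := s.toList
  let res := (List.range indices.length).foldl (fun st _ => pvStepA l indices st) ([], 0)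
  String.ofList res.1

-- ===== PORT B =====
-- first = {}; for i, v in enumerate(indices): if v not in first: first[v] = i
def pvFirstPos (indices : List Int) : PySem.Dict Int Int :=
  (PySem.List.enumerate indices).foldl
    (fun d p => if d.contains p.2 then d else d.insert p.2 p.1) PySem.Dict.empty

-- out = []; x = 0; while x in first: out.append(s[first[x]]); x += 1
-- fuel ≥ number of distinct keys + 1 makes the while-loop total; pyGet? none = IndexError (outside Pre_).
def pvWalkB (l : List Char) (d : PySem.Dict Int Int) : Nat → Int → List Char → List Char
  | 0, _, acc => acc
  | fuel + 1, x, acc =>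
    match d.get? x with
    | some i =>
      match PySem.List.pyGet? l i with
      | some c => pvWalkB l d fuel (x + 1) (acc ++ [c])
      | none => acc
    | none => acc

def ShuffleString_alt (s : String) (indices : List Int) : String :=
  String.ofList (pvWalkB s.toList (pvFirstPos indices) (indices.length + 1) 0 [])

-- ===== PRECONDITION & SPEC =====
-- Excludes exactly the inputs on which Python A raises IndexError: the chain 0,1,…,x all occur in
-- indices but the first occurrence of x lies beyond the end of s (B raises there too).
def Pre_ShuffleString (s : String) (indices : List Int) : Prop :=
  ∀ x : Nat, x < indices.length →
    (∀ y : Nat, y ≤ x → ((y : Int) ∈ indices)) →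
    ∀ k, PySem.List.index? indices ((x : Nat) : Int) = some k → k < s.toList.length
instance (s : String) (indices : List Int) : Decidable (Pre_ShuffleString s indices) := by
  unfold Pre_ShuffleString; infer_instance

def pvWitness_ShuffleString : String × List Int := ("abc", [2, 0, 1])

def Spec_ShuffleString (s : String) (indices : List Int) (out : String) : Prop := out = ShuffleString_alt s indices
instance (s : String) (indices : List Int) (out : String) : Decidable (Spec_ShuffleString s indices out) := by unfold Spec_ShuffleString; infer_instance

-- ===== CLAIM (what is proved, stated in full; the proofs are below) =====
def Claim_equal_ShuffleString : Prop := ∀ (s : String) (indices : List Int), Dom_ShuffleString s indices → Pre_ShuffleString s indices → Spec_ShuffleString s indices (ShuffleString s indices)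

-- ===== LEMMAS AND PROOFS =====

-- The first-occurrence dict built by B agrees with the first-occurrence scan A performs.
theorem pvFirstPos_get? (indices : List Int) :
    ∀ v : Int, (pvFirstPos indices).get? v = (PySem.List.index? indices v).map (fun k => ((k : Nat) : Int)) := by
  induction indices using List.reverseRecOn with
  | nil => intro v; simp [pvFirstPos, PySem.List.enumerate_nil, PySem.Dict.get?_empty]
  | append_singleton xs a ih =>
    intro v
    have hstep : pvFirstPos (xs ++ [a]) =
        (if (pvFirstPos xs).contains a then pvFirstPos xs
         else (pvFirstPos xs).insert a ((xs.length : Int))) := by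
      simp [pvFirstPos, PySem.List.enumerate_append, List.foldl_append, PySem.List.enumerate]
    have hcont : (pvFirstPos xs).contains a = decide (a ∈ xs) := by
      rw [PySem.Dict.contains_eq_isSome_get?, ih a]
      rcases h : PySem.List.index? xs a with _ | k
      · have hna : a ∉ xs := (PySem.List.index?_eq_none_iff xs a).mp h
        simp [hna]
      · have hin : a ∈ xs := (PySem.List.index?_isSome_iff xs a).mp (by rw [h]; rfl)
        simp [hin]
    by_cases ha : a ∈ xs
    · rw [hstep, hcont, if_pos (by simp [ha])]
      rw [ih v]
      by_cases hv : v ∈ xs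
      · rw [PySem.List.index?_append_of_mem _ hv]
      · have hva : v ≠ a := fun h => hv (h ▸ ha)
        have h1 : PySem.List.index? xs v = none := (PySem.List.index?_eq_none_iff xs v).mpr hv
        have h2 : PySem.List.index? (xs ++ [a]) v = none := by
          refine (PySem.List.index?_eq_none_iff _ v).mpr ?_
          simp [hv, hva]
        rw [h1, h2]
    · rw [hstep, hcont, if_neg (by simp [ha])]
      by_cases hva : v = a
      · subst hva
        rw [PySem.Dict.get?_insert_self, PySem.List.index?_append_singleton_self xs v ha]
        simp
      · rw [PySem.Dict.get?_insert_of_ne _ _ hva, ih v]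
        by_cases hv : v ∈ xs
        · rw [PySem.List.index?_append_of_mem _ hv]
        · have h1 : PySem.List.index? xs v = none := (PySem.List.index?_eq_none_iff xs v).mpr hv
          have h2 : PySem.List.index? (xs ++ [a]) v = none := by
            refine (PySem.List.index?_eq_none_iff _ v).mpr ?_
            simp [hv, hva]
          rw [h1, h2]

-- Iterating a state transformer is what A's body-ignoring foldl over range computes.
theorem pvFoldl_range_iterate {α : Type} (f : α → α) (n : Nat) (init : α) :
    (List.range n).foldl (fun st _ => f st) init = f^[n] init := by
  induction n with
  | zero => simp
  | succ m ih =>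
    rw [List.range_succ, List.foldl_append, ih, Function.iterate_succ_apply']
    rfl

-- Counting-down measure for the while loop: values ≥ x available in indices at offsets < n.
def pvCap (indices : List Int) (x : Int) : Nat := indices.countP (fun v => decide (x ≤ v))

theorem pvCap_succ (indices : List Int) (x : Int) :
    pvCap indices x = pvCap indices (x + 1) + indices.count x := by
  induction indices with
  | nil => simp [pvCap]
  | cons a t ih =>
    rcases lt_trichotomy a x with h | h | h
    · have h1 : ¬ x ≤ a := by omega
      have h2 : ¬ x + 1 ≤ a := by omega
      have h2' : ¬ x < a := by omega
      have h3 : ¬ a = x := by omega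
      simp [pvCap, h1, h2, h2', h3] at *
      omega
    · subst h
      have h2 : ¬ a + 1 ≤ a := by omega
      have h2' : ¬ a < a := by omega
      simp [pvCap, h2] at *
      omega
    · have h1 : x ≤ a := by omega
      have h2 : x + 1 ≤ a := by omega
      have h2' : x < a := by omega
      have h3 : ¬ a = x := by omega
      simp [pvCap, h1, h2, h2', h3] at *
      omega

theorem pvWalkB_eq_iterate (l : List Char) (indices : List Int) :
    ∀ (n : Nat) (x : Int) (acc : List Char), pvCap indices x ≤ n →
      pvWalkB l (pvFirstPos indices) (n + 1) x acc = ((pvStepA l indices)^[n] (acc, x)).1 := by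
  intro n
  induction n with
  | zero =>
    intro x acc hcap
    have hx : x ∉ indices := by
      intro hx
      have h1 : 0 < indices.count x := List.count_pos_iff.mpr hx
      have h2 := pvCap_succ indices x
      omega
    have hidx : PySem.List.index? indices x = none := (PySem.List.index?_eq_none_iff indices x).mpr hx
    have hidx' := hidx; rw [PySem.List.index?_eq_idxOf?] at hidx'
    simp [pvWalkB, pvFirstPos_get?, hidx, hidx']
  | succ m ih =>
    intro x acc hcap
    rcases hidx : PySem.List.index? indices x with _ | i
    · have hidx' := hidx; rw [PySem.List.index?_eq_idxOf?] at hidx'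
      have hfrozen : pvStepA l indices (acc, x) = (acc, x) := by simp [pvStepA, hidx, hidx']
      rw [Function.iterate_fixed hfrozen]
      simp [pvWalkB, pvFirstPos_get?, hidx, hidx']
    · have hidx' := hidx; rw [PySem.List.index?_eq_idxOf?] at hidx'
      rcases hget : PySem.List.pyGet? l ((i : Nat) : Int) with _ | c
      · have hget' := hget; rw [PySem.List.pyGet?_natCast] at hget'
        have hfrozen : pvStepA l indices (acc, x) = (acc, x) := by simp [pvStepA, hidx, hidx', hget, hget']
        rw [Function.iterate_fixed hfrozen]
        simp [pvWalkB, pvFirstPos_get?, hidx, hidx', hget, hget']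
      · have hget' := hget; rw [PySem.List.pyGet?_natCast] at hget'
        have hx : x ∈ indices := (PySem.List.index?_isSome_iff indices x).mp (by rw [hidx]; rfl)
        have hcnt : 0 < indices.count x := List.count_pos_iff.mpr hx
        have hcap' : pvCap indices (x + 1) ≤ m := by
          have := pvCap_succ indices x; omega
        have hstep : pvStepA l indices (acc, x) = (acc ++ [c], x + 1) := by
          simp [pvStepA, hidx, hidx', hget, hget']
        rw [Function.iterate_succ_apply, hstep]
        have := ih (x + 1) (acc ++ [c]) hcap'
        rw [← this]
        simp [pvWalkB, pvFirstPos_get?, hidx, hidx', hget, hget']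

theorem pvCap_le_length (indices : List Int) (x : Int) : pvCap indices x ≤ indices.length := by
  exact List.countP_le_length

-- ===== VERDICT (by name: the statement is the Claim_ definition above) =====
theorem ShuffleString_spec : Claim_equal_ShuffleString := by
  intro s indices _ _
  unfold Spec_ShuffleString ShuffleString ShuffleString_alt
  simp only []
  rw [pvFoldl_range_iterate (pvStepA s.toList indices) indices.length ([], 0),
      pvWalkB_eq_iterate s.toList indices indices.length 0 [] (pvCap_le_length indices 0)]
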